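-- pv_equiv track=rewrite | github.com/meleeweapon/hardvard_cs50p_my_files | harvard_cs50p/problem_sets/problem_set_2/vanity_plates.py | valid_vanity_plate
-- ===== SOURCE A (Python) =====
-- import string
--
-- def valid_vanity_plate(plate: str) -> bool:
--   if not (len(plate) >= 2 and len(plate) <= 6):
--     return False
--   if not plate.isalnum():
--     return False
--   if not plate[:2].isalpha():
--     return False
--
--   # find the first nums ind
--   first_num_ind = None
--   for ind, char in enumerate(plate):
--     if char.isdigit():
--       first_num_ind = ind
--       break
--   # if a num is found, slice the number part and check if
--   # it's all digits
--   if first_num_ind is not None: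
--     if plate[first_num_ind] == "0":
--       return False
--     number_part = plate[first_num_ind:]
--     if not number_part.isdigit():
--       return False
--
--   for char in plate:
--     if char.isspace() or char in string.punctuation:
--       return False
--
--   return True
-- ===== SOURCE B (Python) =====
-- def valid_vanity_plate(plate: str) -> bool:
--     if not (2 <= len(plate) <= 6 and plate.isalnum() and plate[:2].isalpha()):
--         return False
--     seen_digit = False
--     for char in plate:
--         if char.isdigit():
--             if not seen_digit:
--                 if char == "0":
--                     return False
--                 seen_digit = True
--         elif seen_digit:
--             return False
--     return True
-- ===== Notes on version B (the rewrite author's own statement) =====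
-- stated objective: simpler
-- what changed: Replaces A's three-phase scan (index hunt for the first digit, slice-and-isdigit check, second redundant punctuation/space loop) with one combined guard plus a single left-to-right pass carrying a seen_digit flag.
import Mathlib
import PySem

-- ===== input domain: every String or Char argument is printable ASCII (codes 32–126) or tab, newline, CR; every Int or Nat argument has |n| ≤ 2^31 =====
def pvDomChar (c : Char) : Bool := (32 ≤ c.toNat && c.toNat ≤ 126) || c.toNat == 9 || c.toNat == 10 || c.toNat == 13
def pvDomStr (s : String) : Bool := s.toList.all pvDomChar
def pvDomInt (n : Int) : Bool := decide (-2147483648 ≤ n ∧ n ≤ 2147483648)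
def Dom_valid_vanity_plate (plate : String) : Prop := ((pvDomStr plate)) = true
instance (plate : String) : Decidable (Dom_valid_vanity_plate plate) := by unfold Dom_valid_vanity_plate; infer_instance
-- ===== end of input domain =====

-- B replaces A's three scans (find first digit index, slice+isdigit, punctuation/space loop)
-- with one combined guard and a single pass carrying a seen_digit flag (objective: simpler).

-- ===== PORT A =====
-- string.punctuation, as a char list
def punctA : List Char := ['!', '"', '#', '$', '%', '&', '\'', '(', ')', '*', '+', ',', '-', '.', '/', ':', ';', '<', '=', '>', '?', '@', '[', '\\', ']', '^', '_', '`', '{', '|', '}', '~']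

-- `for ind, char in enumerate(plate): if char.isdigit(): first_num_ind = ind; break`
def findDigitA : List Char → Nat → Option Nat
  | [], _ => none
  | c :: rest, i => if PySem.Chars.isdigit c then some i else findDigitA rest (i + 1)

-- `for char in plate: if char.isspace() or char in string.punctuation: return False` + final `return True`
def lastLoopA : List Char → Bool
  | [] => true
  | c :: rest =>
    if PySem.Chars.isspace c || PySem.Chars.isIn [c] punctA then false else lastLoopA rest

def valid_vanity_plate (plate : String) : Bool :=
  let cs := plate.toList
  if !(decide (cs.length ≥ 2) && decide (cs.length ≤ 6)) then false
  else if !(PySem.Chars.strIsalnum cs) then false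
  else if !(PySem.Chars.strIsalpha (PySem.List.slice cs none (some (2 : Int)))) then false
  else
    match findDigitA cs 0 with
    | none => lastLoopA cs
    | some i =>
      if PySem.List.pyGet? cs (i : Int) = some '0' then false
      else if !(PySem.Chars.strIsdigit (PySem.List.slice cs (some (i : Int)) none)) then false
      else lastLoopA cs

-- ===== PORT B =====
def loopB : List Char → Bool → Bool
  | [], _ => true
  | c :: rest, seen =>
    if PySem.Chars.isdigit c then
      if !seen then (if c = '0' then false else loopB rest true)
      else loopB rest seen
    else if seen then false
    else loopB rest seen

def valid_vanity_plate_alt (plate : String) : Bool :=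
  let cs := plate.toList
  if decide (2 ≤ cs.length) && decide (cs.length ≤ 6) && PySem.Chars.strIsalnum cs
      && PySem.Chars.strIsalpha (PySem.List.slice cs none (some (2 : Int)))
  then loopB cs false
  else false

-- ===== PRECONDITION & SPEC =====
def Spec_valid_vanity_plate (plate : String) (out : Bool) : Prop := out = valid_vanity_plate_alt plate
instance (plate : String) (out : Bool) : Decidable (Spec_valid_vanity_plate plate out) := by unfold Spec_valid_vanity_plate; infer_instance

-- ===== CLAIM (what is proved, stated in full; the proofs are below) =====
def Claim_equal_valid_vanity_plate : Prop := ∀ (plate : String), Dom_valid_vanity_plate plate → Spec_valid_vanity_plate plate (valid_vanity_plate plate)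

-- ===== LEMMAS AND PROOFS =====

-- every alphanumeric char (PySem's ASCII isalnum) sits in one of the three code ranges
theorem alnum_ranges (c : Char) (h : PySem.Chars.isalnum c = true) :
    (48 ≤ c.toNat ∧ c.toNat ≤ 57) ∨ (65 ≤ c.toNat ∧ c.toNat ≤ 90) ∨ (97 ≤ c.toNat ∧ c.toNat ≤ 122) := by
  simp [PySem.Chars.isalnum, PySem.Chars.isalpha, PySem.Chars.isupper, PySem.Chars.islower,
    PySem.Chars.isdigit, Char.le_def, UInt32.le_iff_toNat_le] at h
  have he : c.toNat = c.val.toNat := rfl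
  omega

theorem alnum_not_space (c : Char) (h : PySem.Chars.isalnum c = true) :
    PySem.Chars.isspace c = false := by
  have hr := alnum_ranges c h
  unfold PySem.Chars.isspace
  simp only [Bool.or_eq_false_iff, Bool.and_eq_false_iff, decide_eq_false_iff_not]
  omega

theorem punct_not_alnum : ∀ c ∈ punctA, PySem.Chars.isalnum c = false := by
  simp [punctA, PySem.Chars.isalnum, PySem.Chars.isalpha, PySem.Chars.isdigit,
    PySem.Chars.isupper, PySem.Chars.islower]

theorem alnum_not_punct (c : Char) (h : PySem.Chars.isalnum c = true) :
    PySem.Chars.isIn [c] punctA = false := by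
  by_contra hne
  have hin : PySem.Chars.isIn [c] punctA = true := by
    cases hval : PySem.Chars.isIn [c] punctA <;> simp_all
  have hinf := (PySem.Chars.isIn_iff_infix [c] punctA).mp hin
  have hmem : c ∈ punctA := hinf.subset (by simp)
  have := punct_not_alnum c hmem
  simp [this] at h

-- A's final punctuation/space loop is vacuous once isalnum has passed
theorem lastLoopA_all_alnum (cs : List Char) (h : ∀ c ∈ cs, PySem.Chars.isalnum c = true) :
    lastLoopA cs = true := by
  induction cs with
  | nil => rfl
  | cons c rest ih =>
    have hc := h c (by simp)
    simp [lastLoopA, alnum_not_space c hc, alnum_not_punct c hc]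
    exact ih (fun x hx => h x (by simp [hx]))

-- shifting the running index in A's enumerate loop
theorem findDigitA_shift (cs : List Char) (k : Nat) :
    findDigitA cs (k + 1) = (findDigitA cs k).map (· + 1) := by
  induction cs generalizing k with
  | nil => rfl
  | cons c rest ih =>
    by_cases hd : PySem.Chars.isdigit c = true
    · simp [findDigitA, hd]
    · simp [findDigitA, hd, ih]

-- once a digit has been seen, B's pass just checks "all remaining chars are digits"
theorem loopB_seen (cs : List Char) : loopB cs true = cs.all PySem.Chars.isdigit := by
  induction cs with
  | nil => rfl
  | cons c rest ih =>
    by_cases hd : PySem.Chars.isdigit c = true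
    · simp [loopB, hd, ih]
    · simp [loopB, hd]

-- the core: A's find-then-slice decision equals B's single pass
theorem core (cs : List Char) :
    (match findDigitA cs 0 with
      | none => true
      | some i =>
        if cs[i]? = some '0' then false
        else PySem.Chars.strIsdigit (cs.drop i)) = loopB cs false := by
  induction cs with
  | nil => rfl
  | cons c rest ih =>
    by_cases hd : PySem.Chars.isdigit c = true
    · simp only [findDigitA, hd, if_pos]
      by_cases h0 : c = '0'
      · subst h0
        simp [loopB, hd]
      · simp [loopB, hd, h0, loopB_seen, PySem.Chars.strIsdigit, List.all_cons]
    · have hstep : findDigitA (c :: rest) 0 = (findDigitA rest 0).map (· + 1) := by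
        simp only [findDigitA, hd, Bool.false_eq_true, if_false]
        exact findDigitA_shift rest 0
      rw [hstep]
      have hloop : loopB (c :: rest) false = loopB rest false := by
        simp [loopB, hd]
      rw [hloop]
      cases hfd : findDigitA rest 0 with
      | none => rw [hfd] at ih; simpa using ih
      | some i =>
        rw [hfd] at ih
        simpa [List.drop_succ_cons] using ih

-- ===== VERDICT (by name: the statement is the Claim_ definition above) =====
theorem valid_vanity_plate_spec : Claim_equal_valid_vanity_plate := by
  intro plate _
  unfold Spec_valid_vanity_plate
  show valid_vanity_plate plate = valid_vanity_plate_alt plate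
  simp only [valid_vanity_plate, valid_vanity_plate_alt]
  generalize plate.toList = cs
  by_cases h1 : 2 ≤ cs.length
  · by_cases h1' : cs.length ≤ 6
    · by_cases h2 : PySem.Chars.strIsalnum cs = true
      · by_cases h3 : PySem.Chars.strIsalpha (PySem.List.slice cs none (some (2 : Int))) = true
        · simp only [ge_iff_le, h1, h1', h2, h3, decide_true, Bool.and_self, Bool.not_true,
            Bool.false_eq_true, if_false, if_true]
          have hall : ∀ c ∈ cs, PySem.Chars.isalnum c = true := by
            intro c hc
            have h2' := h2
            simp only [PySem.Chars.strIsalnum, Bool.and_eq_true, List.all_eq_true] at h2'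
            exact h2'.2 c hc
          have hlast := lastLoopA_all_alnum cs hall
          have hcore := core cs
          cases hfd : findDigitA cs 0 with
          | none =>
            simp only [hfd] at hcore
            simp [hlast, ← hcore]
          | some i =>
            simp only [hfd] at hcore
            rw [← hcore]
            simp only [PySem.List.pyGet?_natCast, PySem.List.slice_from_natCast]
            by_cases h0 : cs[i]? = some '0'
            · simp [h0]
            · simp [h0, hlast]
        · simp [h1, h1', h2, h3]
      · simp [h1, h1', h2]
    · simp [h1']
  · simp [h1]
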